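-- pv_equiv track=rewrite | github.com/tiendungtcu/reup-tool | autobot.py | _sanitize_pipeline_steps
-- ===== SOURCE A (Python) =====
-- from typing import Any, Callable, Dict, Optional
--
-- def _default_pipeline_steps() -> Dict[str, bool]:
--     return {
--         "scan": True,
--         "download": True,
--         "render": True,
--         "upload": True,
--     }
--
-- def _sanitize_pipeline_steps(pipeline_steps: Optional[Dict[str, Any]]) -> Dict[str, bool]:
--     defaults = _default_pipeline_steps()
--     if isinstance(pipeline_steps, dict):
--         for key in defaults:
--             if key in pipeline_steps:
--                 defaults[key] = bool(pipeline_steps[key])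
--
--     if defaults["upload"]:
--         defaults["render"] = True
--         defaults["download"] = True
--
--     if defaults["render"] and not defaults["download"]:
--         defaults["download"] = True
--
--     if not defaults["render"]:
--         defaults["upload"] = False
--
--     if not defaults["download"]:
--         defaults["render"] = False
--         defaults["upload"] = False
--
--     return defaults
-- ===== SOURCE B (Python) =====
-- def _sanitize_pipeline_steps(pipeline_steps):
--     src = pipeline_steps if isinstance(pipeline_steps, dict) else {}
--     chain = ["download", "render", "upload"]
--     requested = [bool(src.get(k, True)) for k in chain]
--     # index of the topmost requested stage; every prerequisite stage below it
--     # must be enabled too, so stage i runs iff i <= top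
--     top = max((i for i, on in enumerate(requested) if on), default=-1)
--     result = {"scan": bool(src.get("scan", True))}
--     for i, k in enumerate(chain):
--         result[k] = i <= top
--     return result
-- ===== Notes on version B (the rewrite author's own statement) =====
-- stated objective: alternative
-- what changed: Instead of A's mutate-and-recheck cascade of four conditional dict rewrites, B computes the index of the topmost requested stage in the download<render<upload dependency chain and enables stage i iff i <= that index, building the result in one pass over the indexed chain.
import Mathlib
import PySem

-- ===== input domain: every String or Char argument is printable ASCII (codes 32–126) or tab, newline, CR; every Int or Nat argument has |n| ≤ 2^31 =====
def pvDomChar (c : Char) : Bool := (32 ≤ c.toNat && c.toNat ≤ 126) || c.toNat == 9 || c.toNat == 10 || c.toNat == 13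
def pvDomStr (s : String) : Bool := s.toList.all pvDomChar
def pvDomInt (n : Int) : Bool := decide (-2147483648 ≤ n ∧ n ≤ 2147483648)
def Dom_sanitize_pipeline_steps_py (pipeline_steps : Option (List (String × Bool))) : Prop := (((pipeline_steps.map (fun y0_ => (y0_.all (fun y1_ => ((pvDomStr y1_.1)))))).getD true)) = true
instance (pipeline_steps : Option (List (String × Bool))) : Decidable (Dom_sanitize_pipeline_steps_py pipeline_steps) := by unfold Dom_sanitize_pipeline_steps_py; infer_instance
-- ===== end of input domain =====

-- B replaces A's mutate-and-recheck dict cascade by locating the topmost requested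
-- stage of the dependency chain and enabling exactly the stages below it (alternative).

-- ===== PORT A =====
-- literal port of _sanitize_pipeline_steps: defaults dict, override loop over its keys,
-- then the four cascading conditional dict updates.  (bool(...) is identity: values are Bool.)
def sanitize_pipeline_steps_py (pipeline_steps : Option (List (String × Bool))) : List (String × Bool) :=
  let defaults : PySem.Dict String Bool :=
    PySem.Dict.mk [("scan", true), ("download", true), ("render", true), ("upload", true)]
  let defaults :=
    match pipeline_steps with
    | none => defaults
    | some ps =>
      -- for key in defaults: if key in pipeline_steps: defaults[key] = bool(pipeline_steps[key])
      ["scan", "download", "render", "upload"].foldl (fun d key =>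
        match PySem.Dict.get? (PySem.Dict.mk ps) key with
        | some v => PySem.Dict.insert d key v
        | none => d) defaults
  -- defaults["upload"] etc. always present; getD never takes its default here
  let defaults :=
    if PySem.Dict.getD defaults "upload" false then
      PySem.Dict.insert (PySem.Dict.insert defaults "render" true) "download" true
    else defaults
  let defaults :=
    if PySem.Dict.getD defaults "render" false && !(PySem.Dict.getD defaults "download" false) then
      PySem.Dict.insert defaults "download" true
    else defaults
  let defaults :=
    if !(PySem.Dict.getD defaults "render" false) then
      PySem.Dict.insert defaults "upload" false
    else defaults
  let defaults :=
    if !(PySem.Dict.getD defaults "download" false) then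
      PySem.Dict.insert (PySem.Dict.insert defaults "render" false) "upload" false
    else defaults
  defaults.items

-- ===== PORT B =====
-- port of Source B: highest requested stage of the chain; stage i runs iff i ≤ top
def sanitize_pipeline_steps_py_alt (pipeline_steps : Option (List (String × Bool))) : List (String × Bool) :=
  let src : PySem.Dict String Bool := PySem.Dict.mk (pipeline_steps.getD [])
  let chain : List String := ["download", "render", "upload"]
  let requested := chain.map (fun k => PySem.Dict.getD src k true)
  let top : Int := (PySem.List.enumerate requested).foldl
      (fun acc p => if p.2 then max acc p.1 else acc) (-1)
  [("scan", PySem.Dict.getD src "scan" true)] ++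
    (PySem.List.enumerate chain).map (fun p => (p.2, decide (p.1 ≤ top)))

-- ===== PRECONDITION & SPEC =====
def Spec_sanitize_pipeline_steps_py (pipeline_steps : Option (List (String × Bool))) (out : List (String × Bool)) : Prop := out = sanitize_pipeline_steps_py_alt pipeline_steps
instance (pipeline_steps : Option (List (String × Bool))) (out : List (String × Bool)) : Decidable (Spec_sanitize_pipeline_steps_py pipeline_steps out) := by unfold Spec_sanitize_pipeline_steps_py; infer_instance

-- ===== CLAIM (what is proved, stated in full; the proofs are below) =====
def Claim_equal_sanitize_pipeline_steps_py : Prop := ∀ (pipeline_steps : Option (List (String × Bool))), Dom_sanitize_pipeline_steps_py pipeline_steps → Spec_sanitize_pipeline_steps_py pipeline_steps (sanitize_pipeline_steps_py pipeline_steps)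

-- ===== LEMMAS AND PROOFS =====

-- A's computation after the override loop, as a function of the four first-match lookups
def pvAcore (a b c r : Option Bool) : List (String × Bool) :=
  let d0 : PySem.Dict String Bool :=
    PySem.Dict.mk [("scan", true), ("download", true), ("render", true), ("upload", true)]
  let d0 := match a with | some v => PySem.Dict.insert d0 "scan" v | none => d0
  let d0 := match b with | some v => PySem.Dict.insert d0 "download" v | none => d0
  let d0 := match c with | some v => PySem.Dict.insert d0 "render" v | none => d0
  let d0 := match r with | some v => PySem.Dict.insert d0 "upload" v | none => d0
  let d0 :=
    if PySem.Dict.getD d0 "upload" false then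
      PySem.Dict.insert (PySem.Dict.insert d0 "render" true) "download" true
    else d0
  let d0 :=
    if PySem.Dict.getD d0 "render" false && !(PySem.Dict.getD d0 "download" false) then
      PySem.Dict.insert d0 "download" true
    else d0
  let d0 :=
    if !(PySem.Dict.getD d0 "render" false) then PySem.Dict.insert d0 "upload" false else d0
  let d0 :=
    if !(PySem.Dict.getD d0 "download" false) then
      PySem.Dict.insert (PySem.Dict.insert d0 "render" false) "upload" false
    else d0
  d0.items

-- B's computation as a function of the same four lookups
def pvBcore (a b c r : Option Bool) : List (String × Bool) :=
  let chain : List String := ["download", "render", "upload"]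
  let requested := [b.getD true, c.getD true, r.getD true]
  let top : Int := (PySem.List.enumerate requested).foldl
      (fun acc p => if p.2 then max acc p.1 else acc) (-1)
  [("scan", a.getD true)] ++
    (PySem.List.enumerate chain).map (fun p => (p.2, decide (p.1 ≤ top)))

theorem pvA_some (l : List (String × Bool)) :
    sanitize_pipeline_steps_py (some l) =
      pvAcore (PySem.Dict.get? (PySem.Dict.mk l) "scan")
              (PySem.Dict.get? (PySem.Dict.mk l) "download")
              (PySem.Dict.get? (PySem.Dict.mk l) "render")
              (PySem.Dict.get? (PySem.Dict.mk l) "upload") := rfl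

theorem pvB_some (l : List (String × Bool)) :
    sanitize_pipeline_steps_py_alt (some l) =
      pvBcore (PySem.Dict.get? (PySem.Dict.mk l) "scan")
              (PySem.Dict.get? (PySem.Dict.mk l) "download")
              (PySem.Dict.get? (PySem.Dict.mk l) "render")
              (PySem.Dict.get? (PySem.Dict.mk l) "upload") := by
  simp [sanitize_pipeline_steps_py_alt, pvBcore, PySem.Dict.getD_eq_get?_getD]

theorem pvCore_eq : ∀ a b c r : Option Bool, pvAcore a b c r = pvBcore a b c r := by decide

-- ===== VERDICT (by name: the statement is the Claim_ definition above) =====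
theorem sanitize_pipeline_steps_py_spec : Claim_equal_sanitize_pipeline_steps_py := by
  intro ps _
  unfold Spec_sanitize_pipeline_steps_py
  cases ps with
  | none => rfl
  | some l => rw [pvA_some, pvB_some, pvCore_eq]
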